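-- pv_equiv track=rewrite | github.com/xiaohan2012/capitalization-restoration-train | baseline3.py | appear_cap_in_sentence_middle
-- ===== SOURCE A (Python) =====
-- def appear_cap_in_sentence_middle(word, title, sents):
--     """
--     If the token at least once appeared in the text not at the beginning of the sentence and capitalized
--
--     >>> title = [u"Feng", u"Chao", u"Liang", u"Blah", u"hehe"]
--     >>> doc = [[u"Feng", u"Chao", u"Liang", u"is", u"in", u"Wuhan", u".", u"hehe"], [u"Chao", u"Liang", u"is", u"not", u"."], [u"Liang", u"Chao", u"is", u"not", u"."]]
--     >>> appear_cap_in_sentence_middle(u"Feng", title, doc)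
--     False
--     >>> appear_cap_in_sentence_middle(u"Chao", title, doc)
--     True
--     >>> appear_cap_in_sentence_middle(u"Blah", title, doc)
--     False
--     >>> appear_cap_in_sentence_middle(u"hehe", title, doc)
--     False
--     """
--     assert (word in title), "The word should be a title word"
--
--     for sent in sents:
--         sent_start = True
--         for w in sent:
--             if not sent_start and w == word and w[0].isalpha() and w[0].isupper(): # appeared cap in the middle of sentence
--                 return True
--             sent_start = False
--
--     return False
-- ===== SOURCE B (Python) =====
-- def appear_cap_in_sentence_middle(word, title, sents):
--     assert (word in title), "The word should be a title word"
--     mids = set()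
--     for sent in sents:
--         mids.update(sent[1:])
--     return word in mids and word[0].isalpha() and word[0].isupper()
-- ===== Notes on version B (the rewrite author's own statement) =====
-- stated objective: alternative
-- what changed: B first builds a set of all tokens occurring at non-initial sentence positions and then answers with one set lookup plus a capitalization test on word itself, instead of A's nested flag-guarded scan that re-tests capitalization per token and early-returns.
import Mathlib
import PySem

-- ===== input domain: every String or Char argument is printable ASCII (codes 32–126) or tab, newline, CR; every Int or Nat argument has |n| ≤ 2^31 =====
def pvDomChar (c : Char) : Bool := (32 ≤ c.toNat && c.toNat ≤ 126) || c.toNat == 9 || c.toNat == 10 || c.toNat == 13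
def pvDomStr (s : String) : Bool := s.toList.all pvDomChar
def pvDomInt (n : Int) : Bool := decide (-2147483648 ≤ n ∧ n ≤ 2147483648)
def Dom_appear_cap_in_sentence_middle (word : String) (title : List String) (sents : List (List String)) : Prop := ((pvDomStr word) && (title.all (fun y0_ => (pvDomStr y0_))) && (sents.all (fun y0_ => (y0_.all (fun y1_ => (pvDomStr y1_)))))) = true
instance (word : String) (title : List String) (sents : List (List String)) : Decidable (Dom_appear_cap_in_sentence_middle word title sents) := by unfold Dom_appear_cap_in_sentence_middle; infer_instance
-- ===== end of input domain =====

-- B builds, in a first pass, the set of all tokens occurring at non-initial sentence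
-- positions, then answers with one set lookup plus a capitalization test on word
-- (objective: alternative decomposition; same asymptotic cost).

-- ===== PORT A =====
-- the per-token test 'w[0].isalpha() and w[0].isupper()'; the [] branch is where Python's
-- w[0] raises IndexError (reachable only for word = "", excluded by Pre_)
def pvHeadCapA (w : String) : Bool :=
  match PySem.Str.pyGet? w 0 with
  | none => false
  | some c => PySem.Chars.isalpha c && PySem.Chars.isupper c

-- inner 'for w in sent' loop with its sent_start flag
def pvInnerA (word : String) : Bool → List String → Bool
  | _, [] => false
  | sent_start, w :: ws =>
      if !sent_start && w == word && pvHeadCapA w then true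
      else pvInnerA word false ws

-- outer 'for sent in sents' loop; the assert is the Pre_ (A raises AssertionError when word ∉ title)
def appear_cap_in_sentence_middle (word : String) (title : List String) (sents : List (List String)) : Bool :=
  match sents with
  | [] => false
  | sent :: rest =>
      if pvInnerA word true sent then true
      else appear_cap_in_sentence_middle word title rest

-- ===== PORT B =====
-- 'word[0].isalpha() and word[0].isupper()'; only evaluated after 'word in mids' succeeded,
-- and word = "" occurring mid-sentence is outside Pre_ (Python B raises IndexError there, like A)
def pvCapB (word : String) : Bool :=
  match word.toList with
  | [] => false
  | c :: _ => PySem.Chars.isalpha c && PySem.Chars.isupper c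

-- 'mids = set(); for sent in sents: mids.update(sent[1:]); return word in mids and cap'
def appear_cap_in_sentence_middle_alt (word : String) (title : List String) (sents : List (List String)) : Bool :=
  let mids : PySem.Set String :=
    sents.foldl (fun acc sent => PySem.Set.update acc (PySem.List.slice sent (some 1) none)) PySem.Set.empty
  PySem.Set.contains mids word && pvCapB word

-- ===== PRECONDITION & SPEC =====
-- Pre_ excludes exactly the inputs on which the Python A raises: word ∉ title (AssertionError),
-- and word = "" occurring past the first token of some sentence (IndexError on w[0]).
def Pre_appear_cap_in_sentence_middle (word : String) (title : List String) (sents : List (List String)) : Prop :=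
  word ∈ title ∧ (word = "" → ∀ sent ∈ sents, word ∉ sent.tail)
instance (word : String) (title : List String) (sents : List (List String)) : Decidable (Pre_appear_cap_in_sentence_middle word title sents) := by unfold Pre_appear_cap_in_sentence_middle; infer_instance

def pvWitness_appear_cap_in_sentence_middle : String × List String × List (List String) :=
  ("Chao", ["Feng", "Chao"], [["Feng", "Chao", "is", "here"], ["Chao", "left"]])

def Spec_appear_cap_in_sentence_middle (word : String) (title : List String) (sents : List (List String)) (out : Bool) : Prop := out = appear_cap_in_sentence_middle_alt word title sents
instance (word : String) (title : List String) (sents : List (List String)) (out : Bool) : Decidable (Spec_appear_cap_in_sentence_middle word title sents out) := by unfold Spec_appear_cap_in_sentence_middle; infer_instance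

-- ===== CLAIM =====
def Claim_equal_appear_cap_in_sentence_middle : Prop := ∀ (word : String) (title : List String) (sents : List (List String)), Dom_appear_cap_in_sentence_middle word title sents → Pre_appear_cap_in_sentence_middle word title sents → Spec_appear_cap_in_sentence_middle word title sents (appear_cap_in_sentence_middle word title sents)

-- ===== LEMMAS AND PROOFS =====

-- for a token equal to word, the per-token head test of A is B's hoisted cap test
lemma pvHeadCapA_eq_capB (word : String) : pvHeadCapA word = pvCapB word := by
  simp only [pvHeadCapA, pvCapB, PySem.Str.pyGet?_eq, PySem.Chars.pyGet?]
  cases word.toList <;> simp [PySem.List.pyGet?, PySem.List.pyIdx?]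

-- if cap fails, A's inner loop never fires
lemma pvInnerA_of_cap_false (word : String) (h : pvCapB word = false) :
    ∀ (sent : List String) (start : Bool), pvInnerA word start sent = false := by
  intro sent
  induction sent with
  | nil => intro start; rfl
  | cons w ws ih =>
      intro start
      simp only [pvInnerA]
      by_cases hw : w = word
      · subst hw; simp [pvHeadCapA_eq_capB, h, ih]
      · simp [hw, ih]

-- if cap holds, A's inner loop is membership of word in the sentence's tail
lemma pvInnerA_of_cap_true (word : String) (h : pvCapB word = true) :
    ∀ (sent : List String) (start : Bool),
      pvInnerA word start sent = (if start then sent.tail else sent).contains word := by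
  intro sent
  induction sent with
  | nil => intro start; cases start <;> rfl
  | cons w ws ih =>
      intro start
      cases start with
      | true =>
          have : pvInnerA word true (w :: ws) = pvInnerA word false ws := by simp [pvInnerA]
          rw [this, ih false]; simp
      | false =>
          simp only [pvInnerA, Bool.not_false, Bool.true_and]
          by_cases hw : w = word
          · subst hw; simp [pvHeadCapA_eq_capB, h]
          · rw [if_neg (by simp [hw]), ih false]
            have hne : word ≠ w := fun hh => hw hh.symm
            simp [hne]

-- membership in B's accumulated set of mid-sentence tokens
lemma mem_mids (word : String) :
    ∀ (sents : List (List String)) (acc : PySem.Set String),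
      (word ∈ sents.foldl (fun acc sent => PySem.Set.update acc sent.tail) acc)
        ↔ word ∈ acc ∨ ∃ sent ∈ sents, word ∈ sent.tail := by
  intro sents
  induction sents with
  | nil => intro acc; simp
  | cons s rest ih =>
      intro acc
      rw [List.foldl_cons, ih]
      simp only [PySem.Set.mem_update, List.mem_cons]
      constructor
      · rintro ((h | h) | ⟨t, ht, hw⟩)
        · exact Or.inl h
        · exact Or.inr ⟨s, Or.inl rfl, h⟩
        · exact Or.inr ⟨t, Or.inr ht, hw⟩
      · rintro (h | ⟨t, (rfl | ht), hw⟩)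
        · exact Or.inl (Or.inl h)
        · exact Or.inl (Or.inr hw)
        · exact Or.inr ⟨t, ht, hw⟩

-- the two ports agree on every input (the Lean ports are total; Pre_ only marks where Python A raises)
lemma ports_eq (word : String) (title : List String) (sents : List (List String)) :
    appear_cap_in_sentence_middle word title sents = appear_cap_in_sentence_middle_alt word title sents := by
  unfold appear_cap_in_sentence_middle_alt
  simp only [PySem.List.slice_from_one]
  by_cases h : pvCapB word = true
  · simp only [h, Bool.and_true, PySem.Set.contains_eq_listContains]
    induction sents with
    | nil => simp [appear_cap_in_sentence_middle, PySem.Set.empty]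
    | cons sent rest ih =>
        simp only [appear_cap_in_sentence_middle, pvInnerA_of_cap_true word h sent true, if_true]
        by_cases hm : word ∈ sent.tail
        · simp [hm, mem_mids]
        · have h1 : sent.tail.contains word = false := by
            simp [hm]
          rw [h1]
          simp only [Bool.false_eq_true, if_false, ih]
          apply Bool.eq_iff_iff.mpr
          simp only [List.contains_iff_mem, mem_mids, List.mem_cons, PySem.Set.empty,
            List.not_mem_nil, false_or]
          constructor
          · rintro ⟨t, ht, hw⟩
            exact ⟨t, Or.inr ht, hw⟩
          · rintro ⟨t, (rfl | ht), hw⟩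
            · exact absurd hw hm
            · exact ⟨t, ht, hw⟩
  · simp only [Bool.not_eq_true] at h
    simp only [h, Bool.and_false]
    induction sents with
    | nil => rfl
    | cons sent rest ih =>
        simp only [appear_cap_in_sentence_middle, pvInnerA_of_cap_false word h sent true,
          Bool.false_eq_true, if_false]
        exact ih

-- ===== VERDICT =====
theorem appear_cap_in_sentence_middle_spec : Claim_equal_appear_cap_in_sentence_middle := by
  intro word title sents _ _
  exact ports_eq word title sents
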